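-- pv_equiv track=rewrite | github.com/effect/contests | advent23/day12/a.py | satisfy
-- ===== SOURCE A (Python) =====
-- def satisfy(a, cnts):
-- 	parts = a.split('.')
-- 	parts = [p for p in parts if p]
-- 	if len(parts) != len(cnts):
-- 		return False
-- 	for i in range(len(parts)):
-- 		if len(parts[i]) != cnts[i]:
-- 			return False
-- 	return True
-- ===== SOURCE B (Python) =====
-- def satisfy(a, cnts):
--     it = iter(cnts)
--     run = 0
--     for ch in a:
--         if ch == '.':
--             if run:
--                 if run != next(it, None):
--                     return False
--                 run = 0
--         else:
--             run += 1
--     if run: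
--         if run != next(it, None):
--             return False
--     return next(it, None) is None
-- ===== Notes on version B (the rewrite author's own statement) =====
-- stated objective: alternative
-- what changed: Replaces split('.')+filter+length/index comparison loop with a single character scan that tracks the current run length and consumes the expected counts from an iterator.
import Mathlib
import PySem

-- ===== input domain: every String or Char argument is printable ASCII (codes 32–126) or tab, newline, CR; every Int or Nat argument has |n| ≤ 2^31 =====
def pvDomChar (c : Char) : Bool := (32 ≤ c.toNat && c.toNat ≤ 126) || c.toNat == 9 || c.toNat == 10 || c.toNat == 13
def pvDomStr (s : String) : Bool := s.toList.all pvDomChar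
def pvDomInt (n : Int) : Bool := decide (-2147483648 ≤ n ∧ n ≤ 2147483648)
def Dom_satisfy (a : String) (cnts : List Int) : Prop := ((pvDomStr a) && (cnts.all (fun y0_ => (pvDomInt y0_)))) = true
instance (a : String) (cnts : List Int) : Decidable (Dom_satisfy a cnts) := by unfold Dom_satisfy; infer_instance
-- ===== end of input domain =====

-- B replaces split+filter+index loop with a single left-to-right scan consuming cnts; same result, no asymptotic change.

-- ===== PORT A =====
def satisfy (a : String) (cnts : List Int) : Bool :=
  let parts := PySem.Chars.splitOn a.toList ['.']
  let parts := parts.filter (fun p => !p.isEmpty)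
  if parts.length ≠ cnts.length then false
  else (List.range parts.length).all
    (fun i => PySem.Chars.len (parts.getD i []) == cnts.getD i 0)

-- ===== PORT B =====
-- scan over the characters; `rem` is the not-yet-consumed suffix of cnts (Python's iterator)
def satisfyScan : List Char → Int → List Int → Bool
  | [], run, rem =>
      if run ≠ 0 then
        match rem with
        | [] => false
        | c :: rest => if run ≠ c then false else rest.isEmpty
      else rem.isEmpty
  | ch :: s, run, rem =>
      if ch = '.' then
        if run ≠ 0 then
          match rem with
          | [] => false
          | c :: rest => if run ≠ c then false else satisfyScan s 0 rest
        else satisfyScan s run rem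
      else satisfyScan s (run + 1) rem

def satisfy_alt (a : String) (cnts : List Int) : Bool :=
  satisfyScan a.toList 0 cnts

-- ===== PRECONDITION & SPEC =====
def Spec_satisfy (a : String) (cnts : List Int) (out : Bool) : Prop := out = satisfy_alt a cnts
instance (a : String) (cnts : List Int) (out : Bool) : Decidable (Spec_satisfy a cnts out) := by unfold Spec_satisfy; infer_instance

-- ===== CLAIM (what is proved, stated in full; the proofs are below) =====
def Claim_equal_satisfy : Prop := ∀ (a : String) (cnts : List Int), Dom_satisfy a cnts → Spec_satisfy a cnts (satisfy a cnts)

-- ===== LEMMAS AND PROOFS =====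

-- the dot-separated segments of l, empties included (what a.split('.') yields)
def segs : List Char → List (List Char)
  | [] => [[]]
  | c :: s =>
      if c = '.' then [] :: segs s
      else
        match segs s with
        | [] => [[c]]
        | h :: t => (c :: h) :: t

theorem segs_ne_nil (l : List Char) : segs l ≠ [] := by
  cases l with
  | nil => simp [segs]
  | cons c s =>
      simp only [segs]
      split
      · simp
      · split <;> simp

theorem splitOn_go_eq_segs (l : List Char) : ∀ (fuel : Nat) (cur : List Char) (acc : List (List Char)),
    l.length ≤ fuel →
    PySem.Chars.splitOn.go ['.'] fuel l cur acc =
      acc.reverse ++ (match segs l with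
                      | [] => []
                      | h :: t => (cur.reverse ++ h) :: t) := by
  induction l with
  | nil =>
      intro fuel cur acc _
      cases fuel <;> simp [PySem.Chars.splitOn.go, segs]
  | cons c s ih =>
      intro fuel cur acc hlen
      cases fuel with
      | zero => simp at hlen
      | succ n =>
          simp only [PySem.Chars.splitOn.go]
          by_cases hc : c = '.'
          · have hpre : List.isPrefixOf ['.'] (c :: s) = true := by
              simp [List.isPrefixOf, hc]
            rw [hpre]
            simp only [List.length_cons] at hlen
            rw [show List.drop (['.'] : List Char).length (c :: s) = s by simp]
            rw [ih n [] (cur.reverse :: acc) (by omega)]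
            rcases hseg : segs s with _ | ⟨h, t⟩
            · exact absurd hseg (segs_ne_nil s)
            · simp [segs, hc, hseg]
          · have hpre : List.isPrefixOf ['.'] (c :: s) = false := by
              simp [List.isPrefixOf]
              exact fun h => absurd h.symm hc
            rw [hpre]
            simp only [Bool.false_eq_true, if_false]
            simp only [List.length_cons] at hlen
            rw [ih n (c :: cur) acc (by omega)]
            rcases hseg : segs s with _ | ⟨h, t⟩
            · exact absurd hseg (segs_ne_nil s)
            · simp [segs, hc, hseg]

theorem splitOn_eq_segs (l : List Char) : PySem.Chars.splitOn l ['.'] = segs l := by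
  unfold PySem.Chars.splitOn
  rw [splitOn_go_eq_segs l (l.length + 1) [] [] (by omega)]
  rcases hseg : segs l with _ | ⟨h, t⟩
  · exact absurd hseg (segs_ne_nil l)
  · simp

-- what B computes: run lengths with a pending prefix run
def pendRuns : Int → List Char → List Int
  | run, [] => if run = 0 then [] else [run]
  | run, c :: s => if c = '.' then (if run = 0 then pendRuns 0 s else run :: pendRuns 0 s)
                   else pendRuns (run + 1) s

theorem satisfyScan_eq (l : List Char) : ∀ (run : Int) (rem : List Int),
    satisfyScan l run rem = decide (pendRuns run l = rem) := by
  induction l with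
  | nil =>
      intro run rem
      by_cases hr : run = 0
      · cases rem <;> simp [satisfyScan, pendRuns, hr]
      · cases rem with
        | nil => simp [satisfyScan, pendRuns, hr]
        | cons c rest =>
            by_cases hc : run = c
            · subst hc
              cases rest <;> simp [satisfyScan, pendRuns, hr]
            · simp [satisfyScan, pendRuns, hr, hc]
  | cons ch s ih =>
      intro run rem
      by_cases hd : ch = '.'
      · by_cases hr : run = 0
        · simp [satisfyScan, pendRuns, hd, hr, ih]
        · cases rem with
          | nil => simp [satisfyScan, pendRuns, hd, hr]
          | cons c rest =>
              by_cases hc : run = c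
              · subst hc
                simp [satisfyScan, pendRuns, hd, hr, ih]
              · simp [satisfyScan, pendRuns, hd, hr, hc]
      · simp [satisfyScan, pendRuns, hd, ih]

-- pendRuns in terms of segs
theorem pendRuns_eq_segs (l : List Char) : ∀ (run : Int), 0 ≤ run →
    ∀ s0 ss, segs l = s0 :: ss →
    pendRuns run l =
      (if run + (s0.length : Int) = 0 then [] else [run + (s0.length : Int)]) ++
        ((ss.filter (fun p => !p.isEmpty)).map (fun p => (p.length : Int))) := by
  induction l with
  | nil =>
      intro run hrun s0 ss hseg
      simp [segs] at hseg
      obtain ⟨h0, hs⟩ := hseg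
      subst h0; subst hs
      by_cases hr : run = 0 <;> simp [pendRuns, hr]
  | cons c s ih =>
      intro run hrun s0 ss hseg
      rcases hseg' : segs s with _ | ⟨h, t⟩
      · exact absurd hseg' (segs_ne_nil s)
      have hrec := ih 0 le_rfl h t hseg'
      have hfm : ((h :: t).filter (fun p => !p.isEmpty)).map (fun p => (p.length : Int)) =
          (if (0 : Int) + (h.length : Int) = 0 then [] else [(0 : Int) + (h.length : Int)]) ++
            ((t.filter (fun p => !p.isEmpty)).map (fun p => (p.length : Int))) := by
        by_cases hh : h = []
        · simp [hh, List.filter]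
        · have hne : (h.length : Int) ≠ 0 := by simpa using hh
          have hie : h.isEmpty = false := by simpa using hh
          simp [List.filter, hie, hh]
      by_cases hc : c = '.'
      · have : segs (c :: s) = [] :: h :: t := by simp [segs, hc, hseg']
        rw [this] at hseg
        cases hseg
        by_cases hr : run = 0
        · subst hr
          simp only [pendRuns, hc, if_true]
          rw [hrec, ← hfm]
          simp
        · simp only [pendRuns, hc, if_true, if_neg hr]
          rw [hrec, ← hfm]
          simp [hr]
      · have heq : segs (c :: s) = (c :: h) :: t := by simp [segs, hc, hseg']
        rw [heq] at hseg
        have hrec' := ih (run + 1) (by omega) h t hseg'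
        cases hseg
        simp only [pendRuns, if_neg hc]
        rw [hrec']
        have hlen : run + (((c :: h)).length : Int) = (run + 1) + (h.length : Int) := by
          simp; ring
        rw [hlen]

-- A's indexed all-loop is list equality (given equal lengths)
theorem all_range_eq_listEq (parts : List (List Char)) : ∀ (cnts : List Int),
    parts.length = cnts.length →
    ((List.range parts.length).all
      (fun i => PySem.Chars.len (parts.getD i []) == cnts.getD i 0))
      = decide (parts.map (fun p => (p.length : Int)) = cnts) := by
  induction parts with
  | nil =>
      intro cnts hlen
      cases cnts with
      | nil => simp
      | cons c cs => simp at hlen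
  | cons p ps ih =>
      intro cnts hlen
      cases cnts with
      | nil => simp at hlen
      | cons c cs =>
          simp only [List.length_cons, List.range_succ_eq_map, List.all_cons, List.all_map]
          have h1 : (ps.length = cs.length) := by simpa using hlen
          have h2 := ih cs h1
          simp only [Function.comp_def, List.getD_cons_succ, List.getD_cons_zero] at *
          rw [show (List.all (List.range ps.length) fun i => PySem.Chars.len (ps.getD i []) == cs.getD i 0) = _ from h2]
          simp [PySem.Chars.len_eq]
          by_cases hpc : (p.length : Int) = c
          · simp [hpc]
          · simp [hpc]

-- ===== VERDICT (by name: the statement is the Claim_ definition above) =====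
theorem satisfy_spec : Claim_equal_satisfy := by
  intro a cnts _
  unfold Spec_satisfy satisfy satisfy_alt
  rw [satisfyScan_eq, splitOn_eq_segs]
  rcases hseg : segs a.toList with _ | ⟨s0, ss⟩
  · exact absurd hseg (segs_ne_nil a.toList)
  · rw [pendRuns_eq_segs a.toList 0 le_rfl s0 ss hseg]
    simp only [zero_add, Int.natCast_eq_zero, List.length_eq_zero_iff]
    set parts := ((s0 :: ss).filter (fun p => !p.isEmpty)) with hparts
    have hmap : parts.map (fun p => (p.length : Int)) =
        (if s0 = [] then [] else [(s0.length : Int)]) ++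
          ((ss.filter (fun p => !p.isEmpty)).map (fun p => (p.length : Int))) := by
      by_cases hh : s0 = []
      · simp [hparts, hh, List.filter]
      · have hie : s0.isEmpty = false := by simpa using hh
        simp [hparts, List.filter, hh, hie]
    by_cases hlen : parts.length = cnts.length
    · rw [if_neg (by omega : ¬ parts.length ≠ cnts.length)]
      rw [all_range_eq_listEq parts cnts hlen, hmap]
    · rw [if_pos (by omega : parts.length ≠ cnts.length)]
      have hne : (if s0 = [] then ([] : List Int) else [(s0.length : Int)]) ++
          ((ss.filter (fun p => !p.isEmpty)).map (fun p => (p.length : Int))) ≠ cnts := by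
        intro h
        apply hlen
        have := congrArg List.length h
        rw [← hmap] at this
        simpa using this
      simp [hne]
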